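-- pv_equiv track=rewrite | github.com/pypi-data/pypi-mirror-141 | packages/eagers/eagers-0.4.2.tar.gz/eagers-0.4.2/eagers/solver/minimize_start_costs.py | spare_storage_check
-- ===== SOURCE A (Python) =====
-- def spare_storage_check(spare_gen,stor_gen,stored_energy,dt):
--     spare_storage = True
--     if any([(spare_gen[j]+stor_gen[j])<0 for j in range(len(spare_gen))]):
--         spare_storage = False #there is insufficient spare capacity in the other generators & storage at any moment
--     else:
--         for i in range(len(spare_gen)):
--             if sum([spare_gen[j]*dt[j] for j in range(i+1)])+stored_energy[i]<0:
--                 spare_storage = False #the cumulative loss of generation would deplete the storage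
--     return spare_storage
-- ===== SOURCE B (Python) =====
-- def spare_storage_check(spare_gen, stor_gen, stored_energy, dt):
--     # Single pass with a running prefix sum instead of re-summing at every step.
--     if any(s + g < 0 for s, g in zip(spare_gen, stor_gen)):
--         return False
--     prefix = 0
--     for s, e, d in zip(spare_gen, stored_energy, dt):
--         prefix += s * d
--         if prefix + e < 0:
--             return False
--     return True
-- ===== Notes on version B (the rewrite author's own statement) =====
-- stated objective: alternative
-- what changed: B keeps a running prefix sum of spare_gen[j]*dt[j] in one pass with early return (zip-based), instead of A's recomputation of the cumulative sum from scratch at every step of an index loop.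
import Mathlib
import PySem

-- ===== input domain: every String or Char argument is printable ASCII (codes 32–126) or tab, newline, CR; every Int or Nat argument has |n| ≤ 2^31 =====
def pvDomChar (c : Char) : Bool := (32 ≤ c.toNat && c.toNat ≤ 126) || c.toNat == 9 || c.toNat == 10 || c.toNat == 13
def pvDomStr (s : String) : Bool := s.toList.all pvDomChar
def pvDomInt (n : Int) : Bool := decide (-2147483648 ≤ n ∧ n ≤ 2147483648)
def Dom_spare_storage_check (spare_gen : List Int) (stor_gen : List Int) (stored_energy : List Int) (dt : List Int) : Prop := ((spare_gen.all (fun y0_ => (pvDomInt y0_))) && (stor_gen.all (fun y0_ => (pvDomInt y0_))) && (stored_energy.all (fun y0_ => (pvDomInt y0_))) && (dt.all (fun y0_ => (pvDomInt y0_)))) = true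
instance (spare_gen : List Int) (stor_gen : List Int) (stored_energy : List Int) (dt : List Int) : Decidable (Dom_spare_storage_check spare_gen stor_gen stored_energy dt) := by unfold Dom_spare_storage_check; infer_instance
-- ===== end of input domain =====

-- B checks the depletion condition with a one-pass running prefix sum instead of A's per-step re-summation (return value only; neither mutates).

-- ===== PORT A =====
-- indices j, i are the nonnegative range indices of A and are in range under Pre_, so getD is exact
def spare_storage_check (spare_gen : List Int) (stor_gen : List Int) (stored_energy : List Int) (dt : List Int) : Bool :=
  if ((List.range spare_gen.length).map
        (fun j => decide (spare_gen.getD j 0 + stor_gen.getD j 0 < 0))).any id then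
    false
  else
    (List.range spare_gen.length).foldl
      (fun acc i =>
        if ((List.range (i+1)).map (fun j => spare_gen.getD j 0 * dt.getD j 0)).sum
             + stored_energy.getD i 0 < 0
        then false else acc)
      true

-- ===== PORT B =====
-- the zip3 loop of Source B with the running prefix sum as accumulator
def altLoop : List Int → List Int → List Int → Int → Bool
  | s :: ss, e :: es, d :: ds, pre =>
      let pre' := pre + s * d
      if pre' + e < 0 then false else altLoop ss es ds pre'
  | _, _, _, _ => true

def spare_storage_check_alt (spare_gen : List Int) (stor_gen : List Int) (stored_energy : List Int) (dt : List Int) : Bool :=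
  if (spare_gen.zip stor_gen).any (fun p => decide (p.1 + p.2 < 0)) then false
  else altLoop spare_gen stored_energy dt 0

-- ===== PRECONDITION & SPEC =====
-- Pre_ excludes exactly the inputs on which A raises IndexError: stor_gen shorter than
-- spare_gen, or (no negative pair, so the second loop runs) dt or stored_energy shorter.
def Pre_spare_storage_check (spare_gen : List Int) (stor_gen : List Int) (stored_energy : List Int) (dt : List Int) : Prop :=
  spare_gen.length ≤ stor_gen.length ∧
  ((∀ j < spare_gen.length, 0 ≤ spare_gen.getD j 0 + stor_gen.getD j 0) →
    spare_gen.length ≤ dt.length ∧ spare_gen.length ≤ stored_energy.length)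
instance (spare_gen : List Int) (stor_gen : List Int) (stored_energy : List Int) (dt : List Int) : Decidable (Pre_spare_storage_check spare_gen stor_gen stored_energy dt) := by unfold Pre_spare_storage_check; infer_instance

def pvWitness_spare_storage_check : List Int × List Int × List Int × List Int :=
  ([-2, 1], [3, 0], [5, 5], [1, 1])

def Spec_spare_storage_check (spare_gen : List Int) (stor_gen : List Int) (stored_energy : List Int) (dt : List Int) (out : Bool) : Prop := out = spare_storage_check_alt spare_gen stor_gen stored_energy dt
instance (spare_gen : List Int) (stor_gen : List Int) (stored_energy : List Int) (dt : List Int) (out : Bool) : Decidable (Spec_spare_storage_check spare_gen stor_gen stored_energy dt out) := by unfold Spec_spare_storage_check; infer_instance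

-- ===== CLAIM (what is proved, stated in full; the proofs are below) =====
def Claim_equal_spare_storage_check : Prop := ∀ (spare_gen : List Int) (stor_gen : List Int) (stored_energy : List Int) (dt : List Int), Dom_spare_storage_check spare_gen stor_gen stored_energy dt → Pre_spare_storage_check spare_gen stor_gen stored_energy dt → Spec_spare_storage_check spare_gen stor_gen stored_energy dt (spare_storage_check spare_gen stor_gen stored_energy dt)
-- ===== LEMMAS AND PROOFS =====

-- A's prefix sum at step i (the inner comprehension of A, named for the proofs)
def psum (sg dtl : List Int) (i : Nat) : Int :=
  ((List.range (i+1)).map (fun j => sg.getD j 0 * dtl.getD j 0)).sum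

lemma psum_zero (s d : Int) (ss ds : List Int) : psum (s :: ss) (d :: ds) 0 = s * d := by
  simp [psum]

lemma psum_succ (s d : Int) (ss ds : List Int) (k : Nat) :
    psum (s :: ss) (d :: ds) (k+1) = s * d + psum ss ds k := by
  simp [psum, List.range_succ_eq_map, List.map_map, Function.comp_def]

-- A's flag loop never resets to true: it computes b && not-any
lemma foldl_flag (p : Nat → Prop) [DecidablePred p] :
    ∀ (l : List Nat) (b : Bool),
      l.foldl (fun acc i => if p i then false else acc) b = (b && !l.any (fun i => decide (p i))) := by
  intro l
  induction l with
  | nil => simp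
  | cons x xs ih =>
      intro b
      rw [List.foldl_cons, ih]
      by_cases hx : p x <;> simp [hx]

lemma zip_any_iff (sg st : List Int) (h : sg.length ≤ st.length) :
    ((sg.zip st).any (fun p => decide (p.1 + p.2 < 0)) = true)
      ↔ ∃ j < sg.length, sg.getD j 0 + st.getD j 0 < 0 := by
  rw [List.any_eq_true]
  constructor
  · rintro ⟨p, hp, hlt⟩
    obtain ⟨i, hi, rfl⟩ := List.mem_iff_getElem.mp hp
    rw [List.length_zip] at hi
    have hi1 : i < sg.length := lt_of_lt_of_le hi (min_le_left _ _)
    have hi2 : i < st.length := lt_of_lt_of_le hi (min_le_right _ _)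
    refine ⟨i, hi1, ?_⟩
    rw [List.getD_eq_getElem sg 0 hi1, List.getD_eq_getElem st 0 hi2]
    simpa [List.getElem_zip] using hlt
  · rintro ⟨j, hj, hlt⟩
    have hj2 : j < st.length := lt_of_lt_of_le hj h
    refine ⟨(sg[j], st[j]), ?_, ?_⟩
    · exact List.mem_iff_getElem.mpr ⟨j, by rw [List.length_zip]; omega, by simp [List.getElem_zip]⟩
    · rw [List.getD_eq_getElem sg 0 hj, List.getD_eq_getElem st 0 hj2] at hlt
      simpa using hlt

lemma altLoop_iff :
    ∀ (sg se dtl : List Int) (c : Int),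
      sg.length ≤ se.length → sg.length ≤ dtl.length →
      (altLoop sg se dtl c = true ↔ ∀ i < sg.length, 0 ≤ c + psum sg dtl i + se.getD i 0) := by
  intro sg
  induction sg with
  | nil => intro se dtl c _ _; simp [altLoop]
  | cons s ss ih =>
      intro se dtl c hse hdt
      match se, dtl with
      | [], _ => simp at hse
      | _ :: _, [] => simp at hdt
      | e :: es, d :: ds =>
        simp only [List.length_cons, Nat.add_le_add_iff_right] at hse hdt
        rw [show altLoop (s :: ss) (e :: es) (d :: ds) c
              = if c + s * d + e < 0 then false else altLoop ss es ds (c + s * d) from rfl]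
        by_cases h0 : c + s * d + e < 0
        · simp only [h0, if_true]
          constructor
          · intro hfalse; exact absurd hfalse (by simp)
          · intro hall
            have := hall 0 (by simp)
            rw [psum_zero] at this
            simp only [List.getD_cons_zero] at this
            omega
        · simp only [h0, if_false]
          rw [ih es ds (c + s * d) hse hdt]
          constructor
          · intro hall i hi
            match i with
            | 0 =>
                rw [psum_zero]; simp only [List.getD_cons_zero]; omega
            | k + 1 =>
                rw [psum_succ]
                simp only [List.getD_cons_succ]
                have := hall k (by simpa using Nat.lt_of_succ_lt_succ hi)
                omega
          · intro hall k hk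
            have := hall (k + 1) (by simpa using Nat.succ_lt_succ hk)
            rw [psum_succ] at this
            simp only [List.getD_cons_succ] at this
            omega

-- ===== VERDICT (by name: the statement is the Claim_ definition above) =====
theorem spare_storage_check_spec : Claim_equal_spare_storage_check := by
  intro sg st se dtl _ hpre
  obtain ⟨hst, hrest⟩ := hpre
  unfold Spec_spare_storage_check spare_storage_check spare_storage_check_alt
  have hany :
      ((List.range sg.length).map (fun j => decide (sg.getD j 0 + st.getD j 0 < 0))).any id
        = (sg.zip st).any (fun p => decide (p.1 + p.2 < 0)) := by
    cases hb : (sg.zip st).any (fun p => decide (p.1 + p.2 < 0)) with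
    | false =>
        rw [List.any_map, List.any_eq_false]
        intro j hj
        simp only [Function.comp_def, id_eq, decide_eq_true_eq]
        intro hlt
        have := (zip_any_iff sg st hst).mpr ⟨j, List.mem_range.mp hj, hlt⟩
        simp [hb] at this
    | true =>
        obtain ⟨j, hj, hlt⟩ := (zip_any_iff sg st hst).mp hb
        rw [List.any_map, List.any_eq_true]
        exact ⟨j, List.mem_range.mpr hj, by simpa using hlt⟩
  rw [hany]
  cases hb : (sg.zip st).any (fun p => decide (p.1 + p.2 < 0)) with
  | true => simp
  | false =>
    simp only [Bool.false_eq_true, if_false]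
    have hnoneg : ∀ j < sg.length, 0 ≤ sg.getD j 0 + st.getD j 0 := by
      intro j hj
      by_contra hneg
      have := (zip_any_iff sg st hst).mpr ⟨j, hj, by omega⟩
      simp [hb] at this
    obtain ⟨hdt, hse⟩ := hrest hnoneg
    have hflag := foldl_flag (fun i => psum sg dtl i + se.getD i 0 < 0) (List.range sg.length) true
    simp only [psum] at hflag
    refine hflag.trans ?_
    rw [Bool.true_and]
    cases ha : altLoop sg se dtl 0 with
    | false =>
        rw [Bool.not_eq_false', List.any_eq_true]
        have hcontra := (not_iff_not.mpr (altLoop_iff sg se dtl 0 hse hdt)).mp (by simp [ha])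
        push Not at hcontra
        obtain ⟨i, hi, hlt⟩ := hcontra
        refine ⟨i, List.mem_range.mpr hi, ?_⟩
        simp only [psum] at hlt
        simp only [decide_eq_true_eq]
        omega
    | true =>
        rw [Bool.not_eq_true', List.any_eq_false]
        intro i hi
        have hall := (altLoop_iff sg se dtl 0 hse hdt).mp ha i (List.mem_range.mp hi)
        simp only [psum] at hall
        simp only [decide_eq_true_eq, not_lt]
        omega
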